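-- pv_equiv track=rewrite | github.com/mike-kane/Portfolio | Computer Science/project Euler solutions/euler_solution_47.py | checkFactors
-- ===== SOURCE A (Python) =====
-- def checkFactors(set1, set2, set3, set4):
--     for num1 in set1:
--         if num1 in set2 or num1 in set3 or num1 in set4:
--             return True
--     for num2 in set2:
--         if num2 in set1 or num2 in set3 or num2 in set4:
--             return True
--     for num3 in set3:
--         if num3 in set1 or num3 in set2 or num3 in set4:
--             return True
--     for num4 in set4:
--         if num4 in set1 or num4 in set2 or num4 in set3:
--             return True
--     return False
-- ===== SOURCE B (Python) =====
-- def checkFactors(set1, set2, set3, set4):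
--     seen = {}
--     for i, coll in enumerate((set1, set2, set3, set4)):
--         for x in coll:
--             if seen.setdefault(x, i) != i:
--                 return True
--     return False
-- ===== Notes on version B (the rewrite author's own statement) =====
-- stated objective: alternative
-- what changed: Replaces A's four element-against-the-other-three-collections membership scans by a single pass over all four collections that records each value's first collection index in a dict and reports overlap when a value reappears from a different collection.
import Mathlib
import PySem

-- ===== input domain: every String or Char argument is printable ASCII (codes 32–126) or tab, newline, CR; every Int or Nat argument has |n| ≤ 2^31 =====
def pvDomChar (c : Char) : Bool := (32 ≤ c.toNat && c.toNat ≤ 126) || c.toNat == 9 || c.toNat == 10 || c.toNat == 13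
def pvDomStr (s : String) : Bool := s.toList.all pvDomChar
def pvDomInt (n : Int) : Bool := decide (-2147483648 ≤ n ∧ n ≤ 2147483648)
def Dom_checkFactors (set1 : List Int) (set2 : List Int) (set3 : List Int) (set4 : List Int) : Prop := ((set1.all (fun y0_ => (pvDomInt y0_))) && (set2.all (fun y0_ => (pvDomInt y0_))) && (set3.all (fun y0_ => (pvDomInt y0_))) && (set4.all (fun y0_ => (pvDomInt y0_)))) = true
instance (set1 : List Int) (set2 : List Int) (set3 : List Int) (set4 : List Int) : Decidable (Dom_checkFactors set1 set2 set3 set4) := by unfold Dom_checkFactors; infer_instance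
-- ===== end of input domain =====

-- header: B makes ONE pass over the four collections, recording in a dict the index of the first
-- collection each value appears in; a value met again from a different collection means overlap
-- (alternative: one dict-building pass instead of A's element-against-three-collections scans).

-- ===== PORT A =====
-- A: four successive for-loops, each with an early `return True` on a three-way membership test.
def checkFactors (set1 : List Int) (set2 : List Int) (set3 : List Int) (set4 : List Int) : Bool :=
  set1.any (fun num1 => set2.contains num1 || set3.contains num1 || set4.contains num1) ||
  set2.any (fun num2 => set1.contains num2 || set3.contains num2 || set4.contains num2) ||
  set3.any (fun num3 => set1.contains num3 || set2.contains num3 || set4.contains num3) ||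
  set4.any (fun num4 => set1.contains num4 || set2.contains num4 || set3.contains num4)

-- ===== PORT B =====
-- inner loop of B for one collection with index i: `seen.setdefault(x, i) != i → return True`;
-- `none` models the early `return True`, `some seen` falling through to the next collection.
def pvScan (i : Int) (xs : List Int) (seen : PySem.Dict Int Int) : Option (PySem.Dict Int Int) :=
  match xs with
  | [] => some seen
  | x :: rest =>
    match seen.get? x with
    | some j => if j ≠ i then none else pvScan i rest seen
    | none => pvScan i rest (seen.insert x i)

-- B: seen = {}; for i, coll in enumerate(...): for x in coll: if seen.setdefault(x, i) != i: return True
def checkFactors_alt (set1 : List Int) (set2 : List Int) (set3 : List Int) (set4 : List Int) : Bool :=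
  match pvScan 0 set1 PySem.Dict.empty with
  | none => true
  | some d1 =>
    match pvScan 1 set2 d1 with
    | none => true
    | some d2 =>
      match pvScan 2 set3 d2 with
      | none => true
      | some d3 =>
        match pvScan 3 set4 d3 with
        | none => true
        | some _ => false

-- ===== PRECONDITION & SPEC =====
def Spec_checkFactors (set1 : List Int) (set2 : List Int) (set3 : List Int) (set4 : List Int) (out : Bool) : Prop := out = checkFactors_alt set1 set2 set3 set4
instance (set1 : List Int) (set2 : List Int) (set3 : List Int) (set4 : List Int) (out : Bool) : Decidable (Spec_checkFactors set1 set2 set3 set4 out) := by unfold Spec_checkFactors; infer_instance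

-- ===== CLAIM =====
def Claim_equal_checkFactors : Prop := ∀ (set1 : List Int) (set2 : List Int) (set3 : List Int) (set4 : List Int), Dom_checkFactors set1 set2 set3 set4 → Spec_checkFactors set1 set2 set3 set4 (checkFactors set1 set2 set3 set4)

-- ===== LEMMAS AND PROOFS =====

-- pvScan returns `none` (early True) iff some element of xs is already in `seen` under another index.
theorem pvScan_eq_none (i : Int) (xs : List Int) (d : PySem.Dict Int Int) :
    pvScan i xs d = none ↔ ∃ x ∈ xs, ∃ j, d.get? x = some j ∧ j ≠ i := by
  induction xs generalizing d with
  | nil => simp [pvScan]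
  | cons x rest ih =>
    simp only [pvScan]
    rcases h : d.get? x with _ | j
    · rw [ih]
      constructor
      · rintro ⟨y, hy, j, hj, hji⟩
        refine ⟨y, List.mem_cons_of_mem _ hy, j, ?_, hji⟩
        rcases eq_or_ne y x with rfl | hne
        · rw [PySem.Dict.get?_insert_self] at hj; cases hj; exact absurd rfl hji
        · rw [PySem.Dict.get?_insert, if_neg hne] at hj; exact hj
      · rintro ⟨y, hy, j, hj, hji⟩
        rcases List.mem_cons.mp hy with rfl | hy'
        · rw [h] at hj; cases hj
        · refine ⟨y, hy', j, ?_, hji⟩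
          rcases eq_or_ne y x with rfl | hne
          · rw [h] at hj; cases hj
          · rw [PySem.Dict.get?_insert, if_neg hne]; exact hj
    · by_cases hji : j = i
      · subst hji
        simp only [ne_eq, not_true_eq_false, if_false, ih]
        constructor
        · rintro ⟨y, hy, k, hk, hki⟩; exact ⟨y, List.mem_cons_of_mem _ hy, k, hk, hki⟩
        · rintro ⟨y, hy, k, hk, hki⟩
          rcases List.mem_cons.mp hy with rfl | hy'
          · rw [h] at hk; cases hk; exact absurd rfl hki
          · exact ⟨y, hy', k, hk, hki⟩
      · simp only [ne_eq, hji, not_false_eq_true, if_true, true_iff]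
        exact ⟨x, List.mem_cons_self, j, h, hji⟩

-- pvScan's resulting dict: old entries kept, fresh keys from xs mapped to i.
theorem pvScan_eq_some (i : Int) (xs : List Int) (d e : PySem.Dict Int Int)
    (h : pvScan i xs d = some e) (v : Int) :
    e.get? v = ((d.get? v).orElse (fun _ => if v ∈ xs then some i else none)) := by
  induction xs generalizing d with
  | nil =>
    simp only [pvScan, Option.some.injEq] at h
    subst h
    cases d.get? v <;> simp [Option.orElse]
  | cons x rest ih =>
    simp only [pvScan] at h
    rcases hx : d.get? x with _ | j
    · rw [hx] at h
      have := ih _ h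
      rw [this]
      rcases eq_or_ne v x with rfl | hne
      · rw [PySem.Dict.get?_insert_self, hx]
        simp [Option.orElse]
      · rw [PySem.Dict.get?_insert, if_neg hne]
        cases d.get? v <;> simp [Option.orElse, hne]
    · rw [hx] at h
      by_cases hji : j = i
      · subst hji
        simp only [ne_eq, not_true_eq_false, if_false] at h
        have := ih _ h
        rw [this]
        rcases eq_or_ne v x with rfl | hne
        · rw [hx]; simp [Option.orElse]
        · cases d.get? v <;> simp [Option.orElse, hne]
      · simp [hji] at h
    
-- characterization of B
theorem alt_true_iff (s1 s2 s3 s4 : List Int) :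
    checkFactors_alt s1 s2 s3 s4 = true ↔
      (∃ x ∈ s2, x ∈ s1) ∨ (∃ x ∈ s3, x ∈ s1 ∨ x ∈ s2) ∨
      (∃ x ∈ s4, x ∈ s1 ∨ x ∈ s2 ∨ x ∈ s3) := by
  unfold checkFactors_alt
  rcases h1 : pvScan 0 s1 PySem.Dict.empty with _ | d1
  · exfalso
    rcases (pvScan_eq_none _ _ _).mp h1 with ⟨x, _, j, hj, _⟩
    rw [PySem.Dict.get?_empty] at hj; cases hj
  · have hd1 : ∀ v, d1.get? v = if v ∈ s1 then some 0 else none := by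
      intro v
      rw [pvScan_eq_some 0 s1 _ _ h1 v, PySem.Dict.get?_empty]
      simp [Option.orElse]
    have hmem1 : ∀ v, (∃ j, d1.get? v = some j ∧ j ≠ (1:Int)) ↔ v ∈ s1 := by
      intro v; rw [hd1]
      by_cases hv : v ∈ s1 <;> simp [hv]
    show (match pvScan 1 s2 d1 with
          | none => true
          | some d2 =>
            match pvScan 2 s3 d2 with
            | none => true
            | some d3 =>
              match pvScan 3 s4 d3 with
              | none => true
              | some _ => false) = true ↔ _
    rcases h2 : pvScan 1 s2 d1 with _ | d2
    · have := (pvScan_eq_none _ _ _).mp h2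
      simp only [hmem1] at this
      exact iff_of_true rfl (Or.inl this)
    · have hn2 : ¬ ∃ x ∈ s2, x ∈ s1 := by
        intro hc
        rcases hc with ⟨x, hx2, hx1⟩
        have : pvScan 1 s2 d1 = none :=
          (pvScan_eq_none _ _ _).mpr ⟨x, hx2, 0, by rw [hd1]; simp [hx1], by decide⟩
        rw [h2] at this; cases this
      have hd2 : ∀ v, d2.get? v = if v ∈ s1 then some 0 else if v ∈ s2 then some 1 else none := by
        intro v
        rw [pvScan_eq_some 1 s2 _ _ h2 v, hd1]
        by_cases hv : v ∈ s1 <;> simp [hv, Option.orElse]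
      have hmem2 : ∀ v, (∃ j, d2.get? v = some j ∧ j ≠ (2:Int)) ↔ v ∈ s1 ∨ v ∈ s2 := by
        intro v; rw [hd2]
        by_cases hv1 : v ∈ s1 <;> by_cases hv2 : v ∈ s2 <;> simp [hv1, hv2]
      show (match pvScan 2 s3 d2 with
            | none => true
            | some d3 =>
              match pvScan 3 s4 d3 with
              | none => true
              | some _ => false) = true ↔ _
      rcases h3 : pvScan 2 s3 d2 with _ | d3
      · have := (pvScan_eq_none _ _ _).mp h3
        simp only [hmem2] at this
        exact iff_of_true rfl (Or.inr (Or.inl this))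
      · have hn3 : ¬ ∃ x ∈ s3, x ∈ s1 ∨ x ∈ s2 := by
          intro hc
          rcases hc with ⟨x, hx3, hx⟩
          have : pvScan 2 s3 d2 = none :=
            (pvScan_eq_none _ _ _).mpr ⟨x, hx3, (hmem2 x).mpr hx⟩
          rw [h3] at this; cases this
        have hd3 : ∀ v, d3.get? v =
            if v ∈ s1 then some 0 else if v ∈ s2 then some 1 else if v ∈ s3 then some 2 else none := by
          intro v
          rw [pvScan_eq_some 2 s3 _ _ h3 v, hd2]
          by_cases hv1 : v ∈ s1 <;> by_cases hv2 : v ∈ s2 <;> simp [hv1, hv2, Option.orElse]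
        have hmem3 : ∀ v, (∃ j, d3.get? v = some j ∧ j ≠ (3:Int)) ↔ v ∈ s1 ∨ v ∈ s2 ∨ v ∈ s3 := by
          intro v; rw [hd3]
          by_cases hv1 : v ∈ s1 <;> by_cases hv2 : v ∈ s2 <;> by_cases hv3 : v ∈ s3 <;>
            simp [hv1, hv2, hv3]
        show (match pvScan 3 s4 d3 with
              | none => true
              | some _ => false) = true ↔ _
        rcases h4 : pvScan 3 s4 d3 with _ | d4
        · have := (pvScan_eq_none _ _ _).mp h4
          simp only [hmem3] at this
          exact iff_of_true rfl (Or.inr (Or.inr this))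
        · have hn4 : ¬ ∃ x ∈ s4, x ∈ s1 ∨ x ∈ s2 ∨ x ∈ s3 := by
            intro hc
            rcases hc with ⟨x, hx4, hx⟩
            have : pvScan 3 s4 d3 = none :=
              (pvScan_eq_none _ _ _).mpr ⟨x, hx4, (hmem3 x).mpr hx⟩
            rw [h4] at this; cases this
          refine iff_of_false Bool.false_ne_true ?_
          rintro (h | h | h)
          · exact hn2 h
          · exact hn3 h
          · exact hn4 h

-- ===== VERDICT =====
theorem checkFactors_spec : Claim_equal_checkFactors := by
  intro s1 s2 s3 s4 _
  unfold Spec_checkFactors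
  rw [Bool.eq_iff_iff, alt_true_iff]
  unfold checkFactors
  simp only [List.any_eq_true, List.contains_eq_mem, Bool.or_eq_true, decide_eq_true_eq]
  constructor
  · rintro (((⟨x, hx, (h | h) | h⟩ | ⟨x, hx, (h | h) | h⟩) | ⟨x, hx, (h | h) | h⟩) | ⟨x, hx, (h | h) | h⟩)
    · exact Or.inl ⟨x, h, hx⟩
    · exact Or.inr (Or.inl ⟨x, h, Or.inl hx⟩)
    · exact Or.inr (Or.inr ⟨x, h, Or.inl hx⟩)
    · exact Or.inl ⟨x, hx, h⟩
    · exact Or.inr (Or.inl ⟨x, h, Or.inr hx⟩)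
    · exact Or.inr (Or.inr ⟨x, h, Or.inr (Or.inl hx)⟩)
    · exact Or.inr (Or.inl ⟨x, hx, Or.inl h⟩)
    · exact Or.inr (Or.inl ⟨x, hx, Or.inr h⟩)
    · exact Or.inr (Or.inr ⟨x, h, Or.inr (Or.inr hx)⟩)
    · exact Or.inr (Or.inr ⟨x, hx, Or.inl h⟩)
    · exact Or.inr (Or.inr ⟨x, hx, Or.inr (Or.inl h)⟩)
    · exact Or.inr (Or.inr ⟨x, hx, Or.inr (Or.inr h)⟩)
  · rintro (⟨x, hx, h⟩ | ⟨x, hx, (h | h)⟩ | ⟨x, hx, (h | h | h)⟩)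
    · exact Or.inl (Or.inl (Or.inl ⟨x, h, Or.inl (Or.inl hx)⟩))
    · exact Or.inl (Or.inl (Or.inl ⟨x, h, Or.inl (Or.inr hx)⟩))
    · exact Or.inl (Or.inl (Or.inr ⟨x, h, Or.inl (Or.inr hx)⟩))
    · exact Or.inl (Or.inl (Or.inl ⟨x, h, Or.inr hx⟩))
    · exact Or.inl (Or.inl (Or.inr ⟨x, h, Or.inr hx⟩))
    · exact Or.inl (Or.inr ⟨x, h, Or.inr hx⟩)
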